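-- pv_equiv track=rewrite | github.com/zhuzhupes/zzpes | zzpes-python/PriceEstimate/Test/tmp.py | converLower
-- ===== SOURCE A (Python) =====
-- import string
--
-- def converLower(words):
--     """
--         字符串转小写
--     @param words:
--     @return:
--     """
--     # 临时str
--     tempstr = ""
--     for c in words:
--         if c in string.ascii_letters:
--             tempstr += c.lower()
--         else:
--             tempstr += c
--     return tempstr
-- ===== SOURCE B (Python) =====
-- import string
--
-- _TABLE = str.maketrans(string.ascii_uppercase, string.ascii_lowercase)
--
-- def converLower(words):
--     """Lowercase ASCII letters via a precomputed translation table (one table-driven pass)."""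
--     return words.translate(_TABLE)
-- ===== Notes on version B (the rewrite author's own statement) =====
-- stated objective: faster
-- what changed: Replaces the explicit per-character loop with string accumulation and the membership test in string.ascii_letters by a translation table precomputed once with str.maketrans and applied in one table-driven pass via str.translate.
import Mathlib
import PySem

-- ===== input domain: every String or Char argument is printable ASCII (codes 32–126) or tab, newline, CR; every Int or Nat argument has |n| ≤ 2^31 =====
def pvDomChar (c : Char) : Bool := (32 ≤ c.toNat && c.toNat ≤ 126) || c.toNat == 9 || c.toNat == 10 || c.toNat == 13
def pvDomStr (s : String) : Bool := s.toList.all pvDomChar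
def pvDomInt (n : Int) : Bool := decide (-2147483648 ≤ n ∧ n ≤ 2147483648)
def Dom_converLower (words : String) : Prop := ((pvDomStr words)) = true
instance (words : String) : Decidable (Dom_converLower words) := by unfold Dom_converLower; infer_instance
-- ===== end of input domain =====

-- B replaces the loop + 'in string.ascii_letters' branch by a precomputed
-- uppercase→lowercase translation table applied per character (str.translate).

-- ===== PORT A =====
-- string.ascii_letters
def pvAsciiLetters : List Char :=
  "abcdefghijklmnopqrstuvwxyzABCDEFGHIJKLMNOPQRSTUVWXYZ".toList

def converLower (words : String) : String :=
  String.mk (words.toList.foldl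
    (fun tempstr c =>
      if pvAsciiLetters.contains c then tempstr ++ [PySem.Chars.lowerChar c]
      else tempstr ++ [c]) [])

-- ===== PORT B =====
-- str.maketrans(string.ascii_uppercase, string.ascii_lowercase): a char→char table
def pvTransTable : PySem.Dict Char Char :=
  PySem.Dict.ofList
    ("ABCDEFGHIJKLMNOPQRSTUVWXYZ".toList.zip "abcdefghijklmnopqrstuvwxyz".toList)

-- words.translate(table): each char is replaced by its table entry, else kept
def converLower_alt (words : String) : String :=
  String.mk (words.toList.map (fun c => pvTransTable.getD c c))

-- ===== PRECONDITION & SPEC =====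
def Spec_converLower (words : String) (out : String) : Prop := out = converLower_alt words
instance (words : String) (out : String) : Decidable (Spec_converLower words out) := by unfold Spec_converLower; infer_instance

-- ===== CLAIM (what is proved, stated in full; the proofs are below) =====
def Claim_equal_converLower : Prop := ∀ (words : String), Dom_converLower words → Spec_converLower words (converLower words)

-- ===== LEMMAS AND PROOFS =====

-- the per-character agreement, decided once for all 128 ASCII codes
set_option maxRecDepth 10000 in
theorem pvCharAgrees :
    ∀ n : Fin 128,
      (if pvAsciiLetters.contains (Char.ofNat n.val) then
          PySem.Chars.lowerChar (Char.ofNat n.val)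
        else Char.ofNat n.val)
        = pvTransTable.getD (Char.ofNat n.val) (Char.ofNat n.val) := by
  decide

theorem pvCharAgrees' (c : Char) (h : pvDomChar c = true) :
    (if pvAsciiLetters.contains c then PySem.Chars.lowerChar c else c)
      = pvTransTable.getD c c := by
  have hlt : c.toNat < 128 := by
    simp [pvDomChar] at h
    omega
  have := pvCharAgrees ⟨c.toNat, hlt⟩
  simpa [Char.ofNat_toNat] using this

theorem pvFoldlMap (l : List Char) (acc : List Char) :
    l.foldl
      (fun tempstr c =>
        if pvAsciiLetters.contains c then tempstr ++ [PySem.Chars.lowerChar c]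
        else tempstr ++ [c]) acc
      = acc ++ l.map (fun c => if pvAsciiLetters.contains c then PySem.Chars.lowerChar c else c) := by
  induction l generalizing acc with
  | nil => simp
  | cons x xs ih =>
    by_cases hx : pvAsciiLetters.contains x = true <;>
      simp only [List.foldl_cons, List.map_cons, hx, Bool.false_eq_true, if_true, if_false, ih,
        List.append_assoc, List.singleton_append]

-- ===== VERDICT (by name: the statement is the Claim_ definition above) =====
theorem converLower_spec : Claim_equal_converLower := by
  intro words hdom
  unfold Spec_converLower converLower converLower_alt
  rw [pvFoldlMap]
  simp only [List.nil_append]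
  congr 1
  apply List.map_congr_left
  intro c hc
  apply pvCharAgrees'
  have := (List.all_eq_true.mp hdom) c hc
  exact this
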